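-- pv_equiv track=rewrite | github.com/yunuheo/Programmers | 문제집/외톨이알파벳.py | solution
-- ===== SOURCE A (Python) =====
-- def solution(input_string):
--     answer = ''
--     dict ={}
--     answer_list =[]
--     for index, alphabet in enumerate(input_string):
--         if alphabet not in dict:
--             dict[alphabet] = [index]   #딕셔너리에 키값(alphabet)이 없으면 키값을 부여하고 index를 value값으로 대입
--         else:
--             dict[alphabet].append(index)  #동일한 키값이 있으면, 인덱스를 연달아 append
--
--     #알파벳이 인접하지 않을 경우를 구해주는 for문
--     for key, value in dict.items():
--         if len(value) >= 2:
--             for i in range(len(value)-1):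
--                 if abs(value[i]-value[i+1])>1:
--                     answer_list.append(key)
--                     break   #인덱스의 차이가 1보다 큰게 하나라도 있으면 종료
--
--     if len(answer_list) == 0:
--         answer = "N"
--     else:
--         answer_list.sort()
--         answer =''.join(answer_list)  #리스트를 문자열형식으로 만들기 위해 join()함수 사용
--
--     return answer
-- ===== SOURCE B (Python) =====
-- def solution(input_string):
--     last = {}
--     lonely = set()
--     for index, ch in enumerate(input_string):
--         if ch in last and index - last[ch] > 1:
--             lonely.add(ch)
--         last[ch] = index
--     return ''.join(sorted(lonely)) if lonely else 'N'
-- ===== Notes on version B (the rewrite author's own statement) =====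
-- stated objective: simpler
-- what changed: B replaces A's two-phase algorithm (build a dict of full index lists per character, then rescan every list for an adjacent gap) with a single enumerate pass that keeps only the last-seen index per character and accumulates a set of lonely characters.
import Mathlib
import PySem

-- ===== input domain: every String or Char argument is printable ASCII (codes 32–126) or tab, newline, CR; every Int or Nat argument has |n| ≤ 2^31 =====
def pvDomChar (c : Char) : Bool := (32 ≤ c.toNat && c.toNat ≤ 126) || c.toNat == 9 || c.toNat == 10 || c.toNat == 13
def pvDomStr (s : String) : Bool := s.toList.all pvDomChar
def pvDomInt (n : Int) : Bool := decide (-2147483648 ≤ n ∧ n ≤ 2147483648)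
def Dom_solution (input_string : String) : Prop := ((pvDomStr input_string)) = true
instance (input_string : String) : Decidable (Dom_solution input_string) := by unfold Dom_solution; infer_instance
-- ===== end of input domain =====

-- B replaces A's index-list dict plus a second nested scan with one enumerate pass keeping
-- only a last-seen index per character and a set of lonely characters (objective: simpler).

-- ===== PORT A =====
-- first loop of A: build dict {char: list of its indices}
def solADict (ps : List (Int × Char)) : PySem.Dict Char (List Int) :=
  ps.foldl
    (fun d p =>
      match d.get? p.2 with
      | none => d.insert p.2 [p.1]
      | some v => d.insert p.2 (v ++ [p.1]))
    PySem.Dict.empty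

-- second loop of A: collect keys whose index list has some adjacent gap > 1
-- (the inner `for … break` appends the key iff some adjacent pair qualifies)
def solAList (items : List (Char × List Int)) : List Char :=
  items.foldl
    (fun acc kv =>
      if 2 ≤ kv.2.length then
        if (PySem.List.pyRange 0 ((kv.2.length : Int) - 1)).any
            (fun i => decide (1 < |PySem.List.pyGetD kv.2 i 0 - PySem.List.pyGetD kv.2 (i + 1) 0|))
        then acc ++ [kv.1] else acc
      else acc)
    []

def solution (input_string : String) : String :=
  let d := solADict (PySem.List.enumerate input_string.toList)
  let answer_list := solAList d.items
  if answer_list.length = 0 then "N"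
  else String.ofList (PySem.List.sorted answer_list id)

-- ===== PORT B =====
-- B's single pass: state = (last-seen index per char, set of lonely chars)
def solBState (ps : List (Int × Char)) : PySem.Dict Char Int × PySem.Set Char :=
  ps.foldl
    (fun st p =>
      let lonely :=
        match st.1.get? p.2 with
        | some j => if 1 < p.1 - j then st.2.add p.2 else st.2
        | none => st.2
      (st.1.insert p.2 p.1, lonely))
    (PySem.Dict.empty, PySem.Set.empty)

def solution_alt (input_string : String) : String :=
  let st := solBState (PySem.List.enumerate input_string.toList)
  if st.2 = [] then "N" else String.ofList (PySem.List.sorted st.2 id)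

-- ===== PRECONDITION & SPEC =====
def Spec_solution (input_string : String) (out : String) : Prop := out = solution_alt input_string
instance (input_string : String) (out : String) : Decidable (Spec_solution input_string out) := by unfold Spec_solution; infer_instance

-- ===== CLAIM (what is proved, stated in full; the proofs are below) =====
def Claim_equal_solution : Prop := ∀ (input_string : String), Dom_solution input_string → Spec_solution input_string (solution input_string)

-- ===== LEMMAS AND PROOFS =====

-- indices at which character c occurs in the enumerated list ps
def occs (ps : List (Int × Char)) (c : Char) : List Int :=
  (ps.filter (fun p => p.2 == c)).map Prod.fst

-- some adjacent pair of the (increasing) index list differs by more than 1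
def hasGap : List Int → Bool
  | a :: b :: t => decide (1 < b - a) || hasGap (b :: t)
  | _ => false

-- A's per-key test, as a boolean on the value list
def condA (v : List Int) : Bool :=
  decide (2 ≤ v.length) &&
    (PySem.List.pyRange 0 ((v.length : Int) - 1)).any
      (fun i => decide (1 < |PySem.List.pyGetD v i 0 - PySem.List.pyGetD v (i + 1) 0|))

theorem occs_append (ps : List (Int × Char)) (p : Int × Char) (c : Char) :
    occs (ps ++ [p]) c = occs ps c ++ (if p.2 = c then [p.1] else []) := by
  by_cases h : p.2 = c <;> simp [occs, List.filter_append, h]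

theorem dict_get (ps : List (Int × Char)) :
    ∀ c : Char, (solADict ps).get? c = if occs ps c = [] then none else some (occs ps c) := by
  induction ps using List.reverseRecOn with
  | nil => intro c; simp [solADict, occs]
  | append_singleton ps p ih =>
    intro c
    have hstep : solADict (ps ++ [p]) =
        (match (solADict ps).get? p.2 with
         | none => (solADict ps).insert p.2 [p.1]
         | some v => (solADict ps).insert p.2 (v ++ [p.1])) := by
      simp [solADict, List.foldl_append]
    rw [hstep, ih p.2]
    by_cases hc : occs ps p.2 = []
    · simp only [hc, if_pos rfl, reduceIte]
      rw [PySem.Dict.get?_insert, occs_append]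
      by_cases hcp : c = p.2
      · subst hcp; simp [hc]
      · have : p.2 ≠ c := fun h => hcp h.symm
        simp [hcp, this, ih c]
    · simp only [hc, reduceIte]
      rw [PySem.Dict.get?_insert, occs_append]
      by_cases hcp : c = p.2
      · subst hcp; simp [hc]
      · have : p.2 ≠ c := fun h => hcp h.symm
        simp [hcp, this, ih c]

theorem keys_insert {ν : Type} (d : PySem.Dict Char ν) (k : Char) (v : ν) :
    (d.insert k v).keys = if d.contains k then d.keys else d.keys ++ [k] := by
  by_cases h : d.contains k = true
  · simp only [PySem.Dict.insert, h, reduceIte, PySem.Dict.keys, List.map_map]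
    refine List.map_congr_left ?_
    intro p _
    by_cases hp : (p.1 == k) = true
    · simp [Function.comp, hp, (eq_of_beq hp).symm]
    · simp [Function.comp, hp]
  · simp [PySem.Dict.insert, h, PySem.Dict.keys]

theorem dict_keys_nodup (ps : List (Int × Char)) : (solADict ps).keys.Nodup := by
  induction ps using List.reverseRecOn with
  | nil => simp [solADict, PySem.Dict.keys, PySem.Dict.empty]
  | append_singleton ps p ih =>
    have hstep : solADict (ps ++ [p]) =
        (match (solADict ps).get? p.2 with
         | none => (solADict ps).insert p.2 [p.1]
         | some v => (solADict ps).insert p.2 (v ++ [p.1])) := by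
      simp [solADict, List.foldl_append]
    rw [hstep]
    cases hg : (solADict ps).get? p.2 with
    | none =>
      have hnm : p.2 ∉ (solADict ps).keys :=
        (PySem.Dict.get?_eq_none_iff_not_mem_keys _ _).mp hg
      have hcon : (solADict ps).contains p.2 = false := by
        rw [Bool.eq_false_iff]
        intro h; exact hnm ((PySem.Dict.contains_iff_mem_keys _ _).mp h)
      rw [keys_insert, hcon]
      simp only [Bool.false_eq_true, reduceIte]
      simp [List.nodup_append, ih, hnm]
      intro a ha h; exact hnm (h ▸ ha)
    | some v =>
      have hcon : (solADict ps).contains p.2 = true := by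
        rw [PySem.Dict.contains_eq_isSome_get?, hg]; rfl
      simp [keys_insert, hcon, ih]

theorem last_get (ps : List (Int × Char)) :
    ∀ c : Char, (solBState ps).1.get? c = (occs ps c).getLast? := by
  induction ps using List.reverseRecOn with
  | nil => intro c; simp [solBState, occs]
  | append_singleton ps p ih =>
    intro c
    have hstep : (solBState (ps ++ [p])).1 = (solBState ps).1.insert p.2 p.1 := by
      simp [solBState, List.foldl_append]
    rw [hstep, PySem.Dict.get?_insert, occs_append]
    by_cases hcp : c = p.2
    · subst hcp; simp
    · have : p.2 ≠ c := fun h => hcp h.symm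
      simp [hcp, this, ih c]

theorem hasGap_concat : ∀ (v : List Int) (n : Int),
    hasGap (v ++ [n]) =
      (hasGap v || match v.getLast? with | some j => decide (1 < n - j) | none => false)
  | [], n => by simp [hasGap]
  | [a], n => by simp [hasGap]
  | a :: b :: t, n => by
    have := hasGap_concat (b :: t) n
    simp only [List.cons_append, hasGap] at *
    rw [this]
    simp [Bool.or_assoc, List.getLast?_cons_cons]

theorem lon_mem (ps : List (Int × Char)) :
    ∀ c : Char, c ∈ (solBState ps).2 ↔ hasGap (occs ps c) = true := by
  induction ps using List.reverseRecOn with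
  | nil => intro c; simp [solBState, occs, PySem.Set.empty, hasGap]
  | append_singleton ps p ih =>
    intro c
    have hstep : (solBState (ps ++ [p])).2 =
        (match (solBState ps).1.get? p.2 with
         | some j => if 1 < p.1 - j then (solBState ps).2.add p.2 else (solBState ps).2
         | none => (solBState ps).2) := by
      simp [solBState, List.foldl_append]
    rw [hstep, last_get ps p.2, occs_append]
    by_cases hcp : c = p.2
    · subst hcp
      rw [if_pos rfl, hasGap_concat]
      cases hg : (occs ps p.2).getLast? with
      | none => simp [hg, ih p.2]
      | some j =>
        by_cases hlt : 1 < p.1 - j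
        · simp [hg, hlt, PySem.Set.mem_add, ih p.2]
        · simp [hg, hlt, ih p.2]
    · have hne : ¬ p.2 = c := fun h => hcp h.symm
      rw [if_neg hne, List.append_nil]
      cases hg : (occs ps p.2).getLast? with
      | none => simp [ih c]
      | some j =>
        by_cases hlt : 1 < p.1 - j
        · simp [hlt, PySem.Set.mem_add, ih c, hcp]
        · simp [hlt, ih c]

theorem lon_nodup (ps : List (Int × Char)) : List.Nodup (solBState ps).2 := by
  induction ps using List.reverseRecOn with
  | nil => simp [solBState, PySem.Set.empty]
  | append_singleton ps p ih =>
    have hstep : (solBState (ps ++ [p])).2 =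
        (match (solBState ps).1.get? p.2 with
         | some j => if 1 < p.1 - j then (solBState ps).2.add p.2 else (solBState ps).2
         | none => (solBState ps).2) := by
      simp [solBState, List.foldl_append]
    rw [hstep]
    cases (solBState ps).1.get? p.2 with
    | none => exact ih
    | some j =>
      by_cases hlt : 1 < p.1 - j
      · simp only [hlt, reduceIte]; exact PySem.Set.nodup_add _ _ ih
      · simp only [hlt, reduceIte]; exact ih

theorem hasGap_iff : ∀ v : List Int,
    (hasGap v = true ↔ ∃ k : Nat, k + 1 < v.length ∧ 1 < v.getD (k + 1) 0 - v.getD k 0)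
  | [] => by simp [hasGap]
  | [a] => by simp [hasGap]
  | a :: b :: t => by
    have ih := hasGap_iff (b :: t)
    simp only [hasGap, Bool.or_eq_true, decide_eq_true_eq, ih]
    constructor
    · rintro (h | ⟨k, hk, hgt⟩)
      · exact ⟨0, by simp, by simpa using h⟩
      · exact ⟨k + 1, by simpa using hk, by simpa using hgt⟩
    · rintro ⟨k, hk, hgt⟩
      cases k with
      | zero => exact Or.inl (by simpa using hgt)
      | succ k => exact Or.inr ⟨k, by simpa using hk, by simpa using hgt⟩

theorem condA_iff (v : List Int) (hv : List.Pairwise (· < ·) v) :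
    condA v = true ↔ hasGap v = true := by
  rw [hasGap_iff]
  simp only [condA, Bool.and_eq_true, decide_eq_true_eq, List.any_eq_true]
  constructor
  · rintro ⟨hlen, i, hi, hgt⟩
    rw [PySem.List.mem_pyRange_one] at hi
    obtain ⟨h0, h1⟩ := hi
    have hk1 : i.toNat + 1 < v.length := by omega
    refine ⟨i.toNat, hk1, ?_⟩
    rw [PySem.List.pyGetD_of_nonneg _ _ h0, PySem.List.pyGetD_of_nonneg _ _ (by omega)] at hgt
    have hto : (i + 1).toNat = i.toNat + 1 := by omega
    rw [hto] at hgt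
    have hlt : v.getD i.toNat 0 < v.getD (i.toNat + 1) 0 := by
      rw [List.getD_eq_getElem _ _ (by omega), List.getD_eq_getElem _ _ hk1]
      exact List.pairwise_iff_getElem.mp hv i.toNat (i.toNat + 1) (by omega) hk1 (by omega)
    rw [abs_sub_comm, abs_of_nonneg (by omega)] at hgt
    exact hgt
  · rintro ⟨k, hk, hgt⟩
    refine ⟨by omega, (k : Int), ?_, ?_⟩
    · rw [PySem.List.mem_pyRange_one]; omega
    · rw [PySem.List.pyGetD_natCast]
      have hcast : ((k : Int) + 1) = ((k + 1 : Nat) : Int) := by push_cast; ring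
      rw [hcast, PySem.List.pyGetD_natCast]
      have hlt : v.getD k 0 < v.getD (k + 1) 0 := by
        rw [List.getD_eq_getElem _ _ (by omega), List.getD_eq_getElem _ _ hk]
        exact List.pairwise_iff_getElem.mp hv k (k + 1) (by omega) hk (by omega)
      rw [abs_sub_comm, abs_of_nonneg (by omega)]
      exact hgt

theorem ans_fold (items : List (Char × List Int)) : ∀ acc : List Char,
    items.foldl
      (fun acc kv =>
        if 2 ≤ kv.2.length then
          if (PySem.List.pyRange 0 ((kv.2.length : Int) - 1)).any
              (fun i => decide (1 < |PySem.List.pyGetD kv.2 i 0 - PySem.List.pyGetD kv.2 (i + 1) 0|))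
          then acc ++ [kv.1] else acc
        else acc)
      acc
      = acc ++ (items.filter (fun kv => condA kv.2)).map Prod.fst := by
  induction items with
  | nil => intro acc; simp
  | cons kv rest ih =>
    intro acc
    rw [List.foldl_cons, List.filter_cons, ih]
    by_cases h1 : 2 ≤ kv.2.length
    · by_cases h2 : (PySem.List.pyRange 0 ((kv.2.length : Int) - 1)).any
          (fun i => decide (1 < |PySem.List.pyGetD kv.2 i 0 - PySem.List.pyGetD kv.2 (i + 1) 0|)) = true
      · have hc : condA kv.2 = true := by
          unfold condA
          rw [Bool.and_eq_true]
          exact ⟨decide_eq_true h1, h2⟩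
        simp [h1, h2, hc]
      · have hc : condA kv.2 = false := by
          unfold condA
          rw [Bool.eq_false_iff.mpr h2]
          simp
        simp only [h1, reduceIte, h2]
        simp [hc]
    · have hc : condA kv.2 = false := by
        unfold condA
        rw [decide_eq_false h1]
        simp
      simp only [h1, reduceIte]
      simp [hc]

theorem ans_eq (items : List (Char × List Int)) :
    solAList items = (items.filter (fun kv => condA kv.2)).map Prod.fst := by
  simpa using ans_fold items []

theorem pairwise_occs (ps : List (Int × Char))
    (h : List.Pairwise (fun p q : Int × Char => p.1 < q.1) ps) (c : Char) :
    List.Pairwise (· < ·) (occs ps c) := by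
  unfold occs
  exact (List.Pairwise.filter _ h).map _ (fun a b hab => hab)

theorem enum_le (cs : List Char) : ∀ (s : Int) (p : Int × Char),
    p ∈ PySem.List.enumerate cs s → s ≤ p.1 := by
  induction cs with
  | nil => intro s p h; simp [PySem.List.enumerate] at h
  | cons a t ih =>
    intro s p h
    simp only [PySem.List.enumerate, List.mem_cons] at h
    rcases h with h | h
    · subst h; simp
    · have := ih (s + 1) p h; omega

theorem enum_pairwise (cs : List Char) : ∀ s : Int,
    List.Pairwise (fun p q : Int × Char => p.1 < q.1) (PySem.List.enumerate cs s) := by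
  induction cs with
  | nil => intro s; simp [PySem.List.enumerate]
  | cons a t ih =>
    intro s
    simp only [PySem.List.enumerate]
    refine List.Pairwise.cons ?_ (ih (s + 1))
    intro q hq
    have := enum_le t (s + 1) q hq
    simpa using by omega

-- ===== VERDICT (by name: the statement is the Claim_ definition above) =====
theorem solution_spec : Claim_equal_solution := by
  unfold Claim_equal_solution
  intro s _
  unfold Spec_solution solution solution_alt
  have hinc := enum_pairwise s.toList 0
  set ps := PySem.List.enumerate s.toList with hps
  have hmemA : ∀ c, c ∈ solAList (solADict ps).items ↔ hasGap (occs ps c) = true := by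
    intro c
    rw [ans_eq]
    constructor
    · intro h
      obtain ⟨kv, hkv, hfst⟩ := List.mem_map.mp h
      obtain ⟨hmem, hcond⟩ := List.mem_filter.mp hkv
      have hget : (solADict ps).get? kv.1 = some kv.2 :=
        PySem.Dict.get?_of_mem_items _ hmem (dict_keys_nodup ps)
      rw [dict_get ps kv.1] at hget
      by_cases h0 : occs ps kv.1 = []
      · simp [h0] at hget
      · rw [if_neg h0, Option.some_inj] at hget
        subst hfst
        rw [← condA_iff _ (pairwise_occs ps hinc kv.1), hget]
        exact hcond
    · intro h
      have h0 : occs ps c ≠ [] := by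
        intro e; rw [e] at h; simp [hasGap] at h
      have hget : (solADict ps).get? c = some (occs ps c) := by
        rw [dict_get ps c, if_neg h0]
      have hmem : (c, occs ps c) ∈ (solADict ps).items :=
        (PySem.Dict.get?_eq_some_iff_mem_items _ _ _ (dict_keys_nodup ps)).mp hget
      refine List.mem_map.mpr ⟨(c, occs ps c), List.mem_filter.mpr ⟨hmem, ?_⟩, rfl⟩
      exact (condA_iff _ (pairwise_occs ps hinc c)).mpr h
  have hnodA : (solAList (solADict ps).items).Nodup := by
    rw [ans_eq]
    have hsub : (((solADict ps).items.filter (fun kv => condA kv.2)).map Prod.fst).Sublist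
        ((solADict ps).items.map Prod.fst) := List.filter_sublist.map _
    have hkeys := dict_keys_nodup ps
    simp only [PySem.Dict.keys] at hkeys
    exact hkeys.sublist hsub
  have hperm : (solAList (solADict ps).items).Perm (solBState ps).2 :=
    (List.perm_ext_iff_of_nodup hnodA (lon_nodup ps)).mpr
      (fun c => (hmemA c).trans (lon_mem ps c).symm)
  have hlen : (solAList (solADict ps).items).length = ((solBState ps).2 : List Char).length :=
    hperm.length_eq
  by_cases he : (solBState ps).2 = ([] : List Char)
  · have h0 : (solAList (solADict ps).items).length = 0 := by
      rw [hlen, he]; rfl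
    simp [he, h0]
  · have hne : ¬ (solAList (solADict ps).items).length = 0 := by
      rw [hlen]
      simpa using he
    rw [if_neg hne, if_neg he]
    exact congrArg String.ofList
      (PySem.List.sorted_eq_sorted_of_perm _ _ id (fun a b h => h) hperm)
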